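-- pv_equiv track=rewrite | github.com/parruc/bagnialmare | bagni/search.py | set_active_facets_first
-- ===== SOURCE A (Python) =====
-- from collections import OrderedDict
--
-- def set_active_facets_first(facets, active_facets):
--     sorted_facets = OrderedDict()
--     non_active_facet_items = []
--     for item in facets.items():
--         if any(facet_dict in active_facets for facet_dict in item[1]):
--             sorted_facets[item[0]] = item[1]
--         else:
--             non_active_facet_items.append(item)
--     for non_active_facet_item in non_active_facet_items:
--         sorted_facets[non_active_facet_item[0]] = non_active_facet_item[1]
--     return sorted_facets
-- ===== SOURCE B (Python) =====
-- from collections import OrderedDict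
--
-- def set_active_facets_first(facets, active_facets):
--     return OrderedDict(
--         sorted(facets.items(),
--                key=lambda item: 0 if any(fd in active_facets for fd in item[1]) else 1))
-- ===== Notes on version B (the rewrite author's own statement) =====
-- stated objective: idiomatic
-- what changed: Replaces A's two-pass partition (insert active items into an OrderedDict, collect the rest in a list, append them afterwards) by one stable sort of facets.items() on a binary is-active key, wrapped back into an OrderedDict.
import Mathlib
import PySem

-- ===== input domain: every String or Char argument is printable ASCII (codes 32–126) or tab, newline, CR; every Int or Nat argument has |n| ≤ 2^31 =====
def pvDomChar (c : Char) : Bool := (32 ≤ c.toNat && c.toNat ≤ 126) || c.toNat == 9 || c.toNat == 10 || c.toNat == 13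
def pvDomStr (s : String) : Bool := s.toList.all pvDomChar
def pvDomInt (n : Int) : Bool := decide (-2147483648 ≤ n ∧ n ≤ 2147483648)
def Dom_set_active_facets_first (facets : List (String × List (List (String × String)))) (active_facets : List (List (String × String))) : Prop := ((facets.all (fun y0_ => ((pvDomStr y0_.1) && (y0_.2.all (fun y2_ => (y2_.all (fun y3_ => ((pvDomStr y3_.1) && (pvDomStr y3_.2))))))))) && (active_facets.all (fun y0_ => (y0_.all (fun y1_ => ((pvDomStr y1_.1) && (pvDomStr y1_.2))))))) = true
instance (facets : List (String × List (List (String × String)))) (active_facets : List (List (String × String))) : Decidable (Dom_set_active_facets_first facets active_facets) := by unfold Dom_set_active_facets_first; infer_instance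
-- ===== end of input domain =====

-- B replaces A's two-pass partition by one stable sort on a binary is-active key (objective: idiomatic; equivalence is about the returned dict's items).

-- ===== PORT A =====
-- Python's `facet_dict in active_facets` compares dicts with ==, which ignores
-- insertion order; exact for assoc lists with distinct keys (the dict convention).
def pyDictEq (d1 d2 : List (String × String)) : Bool :=
  d1.all (fun p => d2.contains p) && d2.all (fun p => d1.contains p)

def set_active_facets_first (facets : List (String × List (List (String × String)))) (active_facets : List (List (String × String))) : List (String × List (List (String × String))) :=
  let st := facets.foldl
    (fun (st : PySem.Dict String (List (List (String × String))) × List (String × List (List (String × String)))) item =>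
      if item.2.any (fun fd => active_facets.any (fun af => pyDictEq fd af)) then
        (st.1.insert item.1 item.2, st.2)
      else
        (st.1, st.2 ++ [item]))
    (PySem.Dict.empty, [])
  (st.2.foldl (fun d it => d.insert it.1 it.2) st.1).items

-- ===== PORT B =====
def set_active_facets_first_alt (facets : List (String × List (List (String × String)))) (active_facets : List (List (String × String))) : List (String × List (List (String × String))) :=
  (PySem.Dict.ofList (PySem.List.sorted facets
      (fun item => if item.2.any (fun fd => active_facets.any (fun af => pyDictEq fd af)) then (0 : Int) else 1))).items

-- ===== PRECONDITION & SPEC =====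
-- facets is a Python dict, so its association-list keys are distinct; Pre_ states
-- exactly that and excludes no input a dict argument can present.
def pvNodupKeys : List (String × List (List (String × String))) → Bool
  | [] => true
  | x :: t => (!(t.map Prod.fst).contains x.1) && pvNodupKeys t

def Pre_set_active_facets_first (facets : List (String × List (List (String × String)))) (active_facets : List (List (String × String))) : Prop :=
  pvNodupKeys facets = true
instance (facets : List (String × List (List (String × String)))) (active_facets : List (List (String × String))) : Decidable (Pre_set_active_facets_first facets active_facets) := by unfold Pre_set_active_facets_first; infer_instance
def pvWitness_set_active_facets_first : (List (String × List (List (String × String)))) × (List (List (String × String))) :=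
  ([("size", [[("k", "v")]]), ("color", [])], [[("k", "v")]])
def Spec_set_active_facets_first (facets : List (String × List (List (String × String)))) (active_facets : List (List (String × String))) (out : List (String × List (List (String × String)))) : Prop := out = set_active_facets_first_alt facets active_facets
instance (facets : List (String × List (List (String × String)))) (active_facets : List (List (String × String))) (out : List (String × List (List (String × String)))) : Decidable (Spec_set_active_facets_first facets active_facets out) := by unfold Spec_set_active_facets_first; infer_instance

-- ===== CLAIM (what is proved, stated in full; the proofs are below) =====
def Claim_equal_set_active_facets_first : Prop := ∀ (facets : List (String × List (List (String × String)))) (active_facets : List (List (String × String))), Dom_set_active_facets_first facets active_facets → Pre_set_active_facets_first facets active_facets → Spec_set_active_facets_first facets active_facets (set_active_facets_first facets active_facets)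

-- ===== LEMMAS AND PROOFS =====

lemma pvNodupKeys_iff (l : List (String × List (List (String × String)))) :
    pvNodupKeys l = true ↔ (l.map Prod.fst).Nodup := by
  induction l with
  | nil => simp [pvNodupKeys]
  | cons x t ih => simp [pvNodupKeys, ih, List.nodup_cons]

-- the is-active predicate both programs apply to an item
def pvActP (active_facets : List (List (String × String))) (item : String × List (List (String × String))) : Bool :=
  item.2.any (fun fd => active_facets.any (fun af => pyDictEq fd af))

-- A's first loop: partition into (dict of active inserts, list of non-active items)
lemma pvFoldA (active_facets : List (List (String × String))) (xs : List (String × List (List (String × String))))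
    (d : PySem.Dict String (List (List (String × String)))) (na : List (String × List (List (String × String)))) :
    xs.foldl
      (fun st item =>
        if item.2.any (fun fd => active_facets.any (fun af => pyDictEq fd af)) then
          (st.1.insert item.1 item.2, st.2)
        else
          (st.1, st.2 ++ [item])) (d, na)
    = ((xs.filter (pvActP active_facets)).foldl (fun d it => d.insert it.1 it.2) d,
       na ++ xs.filter (fun it => !pvActP active_facets it)) := by
  induction xs generalizing d na with
  | nil => simp
  | cons x xs ih =>
    by_cases hx : (x.2.any fun fd => active_facets.any fun af => pyDictEq fd af) = true
    · rw [List.foldl_cons, if_pos hx, ih]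
      have hp : pvActP active_facets x = true := hx
      simp [hp, List.foldl_cons]
    · rw [List.foldl_cons, if_neg hx, ih]
      have hp : pvActP active_facets x = false := by simpa [pvActP] using hx
      simp [hp]

lemma pvInsertBy_append {α : Type} (before : α → α → Bool) (x : α) (as bs : List α)
    (h : ∀ y ∈ as, before x y = false) :
    PySem.List.insertBy before x (as ++ bs) = as ++ PySem.List.insertBy before x bs := by
  induction as with
  | nil => simp
  | cons a as ih =>
    have ha : before x a = false := h a (by simp)
    simp [PySem.List.insertBy, ha]
    exact ih (fun y hy => h y (by simp [hy]))

-- stable insertion sort on a binary 0/1 key is the stable two-way partition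
lemma pvFoldIns {α : Type} (p : α → Bool) (xs : List α) :
    ∀ (as bs : List α), (∀ y ∈ as, p y = true) → (∀ y ∈ bs, p y = false) →
    xs.foldl (fun acc x => PySem.List.insertBy
        (fun a b => decide ((if p a then (0 : Int) else 1) < (if p b then (0 : Int) else 1))) x acc) (as ++ bs)
      = (as ++ xs.filter p) ++ (bs ++ xs.filter (fun x => !p x)) := by
  induction xs with
  | nil => intro as bs _ _; simp
  | cons x xs ih =>
    intro as bs has hbs
    by_cases hx : p x
    · have hstep : PySem.List.insertBy
          (fun a b => decide ((if p a then (0 : Int) else 1) < (if p b then (0 : Int) else 1))) x (as ++ bs)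
          = (as ++ [x]) ++ bs := by
        rw [pvInsertBy_append]
        · cases bs with
          | nil => simp [PySem.List.insertBy]
          | cons b bs' =>
            have hb : p b = false := hbs b (by simp)
            simp [PySem.List.insertBy, hx, hb]
        · intro y hy
          simp [hx, has y hy]
      rw [List.foldl_cons, hstep, ih (as ++ [x]) bs
            (by intro y hy; rcases List.mem_append.mp hy with h | h
                · exact has y h
                · simp at h; simpa [h] using hx) hbs]
      simp [hx]
    · have hx' : p x = false := by simpa using hx
      have hstep : PySem.List.insertBy
          (fun a b => decide ((if p a then (0 : Int) else 1) < (if p b then (0 : Int) else 1))) x (as ++ bs)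
          = as ++ (bs ++ [x]) := by
        rw [PySem.List.insertBy_of_forall_not_before]
        · simp
        · intro y _
          simp [hx']
          split <;> omega
      rw [List.foldl_cons, hstep, ih as (bs ++ [x]) has
            (by intro y hy; rcases List.mem_append.mp hy with h | h
                · exact hbs y h
                · simp at h; simpa [h] using hx')]
      simp [hx']

lemma pvSortedBinary {α : Type} (p : α → Bool) (xs : List α) :
    PySem.List.sorted xs (fun x => if p x then (0 : Int) else 1)
      = xs.filter p ++ xs.filter (fun x => !p x) := by
  rw [PySem.List.sorted_eq_foldl_insertBy]
  simpa using pvFoldIns p xs [] [] (by simp) (by simp)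

lemma pvOfListItems {ν : Type} (l : List (String × ν)) (h : (l.map Prod.fst).Nodup) :
    (PySem.Dict.ofList l).items = l := by
  show (PySem.Dict.empty.update l).items = l
  have : PySem.Dict.empty.update l = l.foldl (fun d (it : String × ν) => d.insert it.1 it.2) PySem.Dict.empty := rfl
  rw [this, PySem.Dict.items_foldl_insert_fresh l Prod.fst Prod.snd PySem.Dict.empty
        (fun a _ => PySem.Dict.contains_empty a.1) h]
  simp [PySem.Dict.empty]

-- ===== VERDICT (by name: the statement is the Claim_ definition above) =====
theorem set_active_facets_first_spec : Claim_equal_set_active_facets_first := by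
  intro facets active_facets _hdom hpre0
  have hpre : (facets.map Prod.fst).Nodup := (pvNodupKeys_iff facets).mp hpre0
  unfold Spec_set_active_facets_first set_active_facets_first set_active_facets_first_alt
  have hperm : ((facets.filter (pvActP active_facets)
      ++ facets.filter (fun it => !pvActP active_facets it)).map Prod.fst).Nodup := by
    have := (List.filter_append_perm (pvActP active_facets) facets).map Prod.fst
    exact this.nodup_iff.mpr hpre
  have hsort : PySem.List.sorted facets
      (fun item => if item.2.any (fun fd => active_facets.any (fun af => pyDictEq fd af)) then (0 : Int) else 1)
      = facets.filter (pvActP active_facets) ++ facets.filter (fun it => !pvActP active_facets it) := by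
    simpa [pvActP] using pvSortedBinary (pvActP active_facets) facets
  rw [hsort, pvOfListItems _ hperm]
  rw [pvFoldA]
  show (List.foldl (fun d it => d.insert it.1 it.2)
      (List.foldl (fun d it => d.insert it.1 it.2) PySem.Dict.empty (facets.filter (pvActP active_facets)))
      ([] ++ facets.filter (fun it => !pvActP active_facets it))).items
    = facets.filter (pvActP active_facets) ++ facets.filter (fun it => !pvActP active_facets it)
  rw [List.nil_append, ← List.foldl_append]
  rw [PySem.Dict.items_foldl_insert_fresh _ Prod.fst Prod.snd PySem.Dict.empty
        (fun a _ => PySem.Dict.contains_empty a.1) hperm]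
  simp [PySem.Dict.empty]
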